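-- pv_equiv track=rewrite | github.com/pybpc/bpc-utils | bpc_utils.py | split_comments
-- ===== SOURCE A (Python) =====
-- def split_comments(code, linesep):
--     """Separates prefixing comments from code.
--
--     This method separates *prefixing* comments and *suffixing* code. It is
--     rather useful when inserting code might break `shebang`_ and encoding
--     cookies (:pep:`263`), etc.
--
--     .. _shebang: https://en.wikipedia.org/wiki/Shebang_(Unix)
--
--     Args:
--         code (str): the code to split comments
--         linesep (str): line seperator
--
--     Returns:
--         Tuple[str, str]: a tuple of *prefix comments* and *suffix code*
--
--     """
--     prefix = ''
--     suffix = ''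
--     prefix_or_suffix = True
--
--     for line in code.split(linesep):
--         if prefix_or_suffix:
--             if line.strip().startswith('#'):
--                 prefix += line + linesep
--                 continue
--             prefix_or_suffix = False
--         suffix += line + linesep
--
--     if prefix_or_suffix:
--         prefix = prefix[:-len(linesep)]  # 3.9+ str.removesuffix
--     else:
--         suffix = suffix[:-len(linesep)]
--
--     return prefix, suffix
-- ===== SOURCE B (Python) =====
-- def split_comments(code, linesep):
--     """Separates prefixing comments from code (boundary-finding reimplementation)."""
--     lines = code.split(linesep)
--     k = 0
--     while k < len(lines) and lines[k].strip().startswith('#'):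
--         k += 1
--     if k == len(lines):
--         return linesep.join(lines), ''
--     if k == 0:
--         return '', linesep.join(lines)
--     return linesep.join(lines[:k]) + linesep, linesep.join(lines[k:])
-- ===== Notes on version B (the rewrite author's own statement) =====
-- stated objective: idiomatic
-- what changed: Replaces the single-pass character-accumulating loop with stateful flag and trailing-separator trimming by a boundary search (length k of the leading run of comment lines) followed by slice-and-join reconstruction, branching on the all-comments case.
import Mathlib
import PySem

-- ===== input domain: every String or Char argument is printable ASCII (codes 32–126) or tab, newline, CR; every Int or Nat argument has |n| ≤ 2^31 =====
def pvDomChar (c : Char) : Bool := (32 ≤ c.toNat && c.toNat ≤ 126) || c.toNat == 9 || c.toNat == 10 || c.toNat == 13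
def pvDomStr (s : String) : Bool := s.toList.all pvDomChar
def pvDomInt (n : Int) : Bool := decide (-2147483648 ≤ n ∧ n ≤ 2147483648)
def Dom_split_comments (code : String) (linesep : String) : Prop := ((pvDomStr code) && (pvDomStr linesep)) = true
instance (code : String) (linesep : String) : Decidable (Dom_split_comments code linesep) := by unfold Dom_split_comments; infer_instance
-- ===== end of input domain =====

-- B replaces A's single-pass character-accumulating loop (flag + trailing-separator trim)
-- by finding the length k of the leading run of comment lines and reconstructing both
-- parts with slice-and-join; objective: idiomatic, same cost.

-- shared helper: Python `line.strip().startswith('#')`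
def pvIsComment (line : String) : Bool := PySem.Str.startswith (PySem.Str.strip line) "#"

-- ===== PORT A =====
-- one loop step of A: state = (prefix, suffix, prefix_or_suffix)
def pvStepA (linesep : String) (st : String × String × Bool) (line : String) : String × String × Bool :=
  if st.2.2 then
    if pvIsComment line then (st.1 ++ line ++ linesep, st.2.1, true)
    else (st.1, st.2.1 ++ line ++ linesep, false)
  else (st.1, st.2.1 ++ line ++ linesep, false)

def split_comments (code : String) (linesep : String) : String × String :=
  -- code.split(linesep); `none` (linesep = "", ValueError) is excluded by Pre_
  let lines := (PySem.Str.split? code linesep).getD []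
  let st := lines.foldl (pvStepA linesep) ("", "", true)
  if st.2.2 then
    (PySem.Str.slice st.1 none (some (-(linesep.length : Int))), st.2.1)
  else
    (st.1, PySem.Str.slice st.2.1 none (some (-(linesep.length : Int))))

-- ===== PORT B =====
-- B's while loop: k = length of the leading run of comment lines
def pvLeadRun : List String → Nat
  | [] => 0
  | l :: ls => if pvIsComment l then pvLeadRun ls + 1 else 0

def split_comments_alt (code : String) (linesep : String) : String × String :=
  let lines := (PySem.Str.split? code linesep).getD []
  let k := pvLeadRun lines
  if k = lines.length then (PySem.Str.join linesep lines, "")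
  else if k = 0 then ("", PySem.Str.join linesep lines)
  else (PySem.Str.join linesep (lines.take k) ++ linesep, PySem.Str.join linesep (lines.drop k))

-- ===== PRECONDITION & SPEC =====
-- Pre_ excludes only linesep = "": there Python's str.split raises ValueError (empty separator).
def Pre_split_comments (code : String) (linesep : String) : Prop := linesep ≠ ""
instance (code : String) (linesep : String) : Decidable (Pre_split_comments code linesep) := by
  unfold Pre_split_comments; infer_instance
def pvWitness_split_comments : String × String := ("#!/x\ny", "\n")

def Spec_split_comments (code : String) (linesep : String) (out : String × String) : Prop := out = split_comments_alt code linesep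
instance (code : String) (linesep : String) (out : String × String) : Decidable (Spec_split_comments code linesep out) := by unfold Spec_split_comments; infer_instance

-- ===== CLAIM (what is proved, stated in full; the proofs are below) =====
def Claim_equal_split_comments : Prop := ∀ (code : String) (linesep : String), Dom_split_comments code linesep → Pre_split_comments code linesep → Spec_split_comments code linesep (split_comments code linesep)

-- ===== LEMMAS AND PROOFS =====

-- A's loop after the flag has dropped: everything is appended to the suffix.
theorem foldl_stepA_false (sep : String) (L : List String) : ∀ (pre suf : String),
    L.foldl (pvStepA sep) (pre, suf, false)
      = (pre, L.foldl (fun a l => a ++ l ++ sep) suf, false) := by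
  induction L with
  | nil => intro pre suf; rfl
  | cons l ls ih => intro pre suf; simp only [List.foldl_cons, pvStepA]; exact ih _ _

-- A's loop from the initial flag: characterised by takeWhile/dropWhile on pvIsComment.
theorem foldl_stepA_true (sep : String) (L : List String) : ∀ (pre suf : String),
    L.foldl (pvStepA sep) (pre, suf, true)
      = ((L.takeWhile pvIsComment).foldl (fun a l => a ++ l ++ sep) pre,
         (L.dropWhile pvIsComment).foldl (fun a l => a ++ l ++ sep) suf,
         (L.dropWhile pvIsComment).isEmpty) := by
  induction L with
  | nil => intro pre suf; rfl
  | cons l ls ih =>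
    intro pre suf
    by_cases h : pvIsComment l
    · simp only [List.foldl_cons, pvStepA, h, if_true, List.takeWhile_cons_of_pos,
        List.dropWhile_cons_of_pos]
      exact ih _ _
    · simp only [List.foldl_cons, pvStepA, h, if_true, if_false, Bool.false_eq_true,
        List.takeWhile_cons_of_neg (by simpa using h),
        List.dropWhile_cons_of_neg (by simpa using h)]
      rw [foldl_stepA_false]
      rfl

-- pvLeadRun is the length of the leading comment run.
theorem pvLeadRun_eq (L : List String) : pvLeadRun L = (L.takeWhile pvIsComment).length := by
  induction L with
  | nil => rfl
  | cons l ls ih =>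
    by_cases h : pvIsComment l
    · simp [pvLeadRun, h, List.takeWhile_cons_of_pos, ih]
    · simp [pvLeadRun, h, List.takeWhile_cons_of_neg (by simpa using h)]

-- the accumulated string, at the character level
theorem toList_foldl_app (sep : String) (L : List String) : ∀ (s : String),
    (L.foldl (fun a l => a ++ l ++ sep) s).toList
      = s.toList ++ (L.map (fun l => l.toList ++ sep.toList)).flatten := by
  induction L with
  | nil => intro s; simp
  | cons l ls ih =>
    intro s
    simp only [List.foldl_cons, List.map_cons, List.flatten_cons, ih,
      String.toList_append, List.append_assoc]

-- flatten of (line ++ sep) pieces = join with a trailing sep, for a nonempty list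
theorem flatten_eq_join_append (sep : List Char) (M : List (List Char)) (h : M ≠ []) :
    (M.map (fun l => l ++ sep)).flatten = PySem.Chars.join sep M ++ sep := by
  induction M with
  | nil => exact absurd rfl h
  | cons a M ih =>
    cases M with
    | nil => simp [PySem.Chars.join_singleton]
    | cons b M =>
      have h2 := ih (by simp)
      simp only [List.map_cons, List.flatten_cons, List.append_assoc] at h2
      simp only [List.map_cons, List.flatten_cons, PySem.Chars.join_cons_cons,
        List.append_assoc, h2]

-- trimming the trailing separator: s[:-len(sep)] on x ++ sep gives back x
theorem slice_trim (x sep : String) (y : List Char) (hsep : sep ≠ "") (hx : x.toList = y ++ sep.toList) :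
    (PySem.Str.slice x none (some (-(sep.length : Int)))).toList = y := by
  have hlen : 0 < sep.length := by
    cases hc : sep.toList with
    | nil => exact absurd (String.toList_inj.mp (by simp [hc])) hsep
    | cons c cs => simp [← String.length_toList, hc]
  rw [PySem.Str.toList_slice]
  have hlen' : sep.length = sep.toList.length := by simp [← String.length_toList]
  rw [PySem.Chars.slice_eq_listSlice, PySem.List.slice_to_neg_natCast _ _ hlen, hx, hlen']
  have h3 : (y ++ sep.toList).length - sep.toList.length = y.length := by simp
  rw [h3, List.take_left]

-- empty-string corner of the same trim
theorem slice_trim_nil (x sep : String) (hx : x.toList = []) :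
    (PySem.Str.slice x none (some (-(sep.length : Int)))).toList = [] := by
  rw [PySem.Str.toList_slice, PySem.Chars.slice_eq_listSlice, hx]
  simp [PySem.List.slice]

-- the accumulated string is join-plus-trailing-separator (nonempty list)
theorem foldl_eq_join_append (sep : String) (M : List String) (h : M ≠ []) :
    M.foldl (fun a l => a ++ l ++ sep) "" = PySem.Str.join sep M ++ sep := by
  apply String.toList_inj.mp
  rw [toList_foldl_app, String.toList_append, PySem.Str.toList_join]
  have hmap : M.map (fun l => l.toList ++ sep.toList)
      = (M.map String.toList).map (fun l => l ++ sep.toList) := by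
    simp [List.map_map, Function.comp]
  rw [hmap, flatten_eq_join_append sep.toList (M.map String.toList) (by simpa using h)]
  rfl

-- trimming the accumulated string gives exactly the join (any list)
theorem trim_foldl (sep : String) (hsep : sep ≠ "") (M : List String) :
    PySem.Str.slice (M.foldl (fun a l => a ++ l ++ sep) "") none (some (-(sep.length : Int)))
      = PySem.Str.join sep M := by
  apply String.toList_inj.mp
  cases hM : M with
  | nil =>
    rw [slice_trim_nil _ sep (by simp), PySem.Str.toList_join]
    simp [PySem.Chars.join_nil]
  | cons a M' =>
    rw [slice_trim _ sep (PySem.Chars.join sep.toList ((a :: M').map String.toList)) hsep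
      (by
        rw [toList_foldl_app]
        have hmap : (a :: M').map (fun l => l.toList ++ sep.toList)
            = ((a :: M').map String.toList).map (fun l => l ++ sep.toList) := by
          simp [List.map_map, Function.comp]
        rw [hmap, flatten_eq_join_append sep.toList ((a :: M').map String.toList) (by simp)]
        rfl),
      PySem.Str.toList_join]

-- the whole equivalence, stated over the already-split line list
theorem core (sep : String) (hsep : sep ≠ "") (L : List String) :
    (let st := L.foldl (pvStepA sep) ("", "", true)
     if st.2.2 then
       (PySem.Str.slice st.1 none (some (-(sep.length : Int))), st.2.1)
     else
       (st.1, PySem.Str.slice st.2.1 none (some (-(sep.length : Int)))))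
    = (let k := pvLeadRun L
       if k = L.length then (PySem.Str.join sep L, "")
       else if k = 0 then ("", PySem.Str.join sep L)
       else (PySem.Str.join sep (L.take k) ++ sep, PySem.Str.join sep (L.drop k))) := by
  have hTD : L.takeWhile pvIsComment ++ L.dropWhile pvIsComment = L :=
    List.takeWhile_append_dropWhile
  simp only [foldl_stepA_true, pvLeadRun_eq]
  generalize hT : L.takeWhile pvIsComment = T at *
  generalize hD : L.dropWhile pvIsComment = D at *
  subst hTD
  by_cases hE : D = []
  · -- all lines are comments (or no lines): flag still true at the end
    subst hE
    simp only [List.append_nil, List.isEmpty_nil, if_true, List.foldl_nil]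
    exact Prod.ext (trim_foldl sep hsep T) rfl
  · -- a first non-comment line exists
    have hlen : T.length ≠ (T ++ D).length := by
      have hDpos : 0 < D.length := List.length_pos_of_ne_nil hE
      simp only [List.length_append]; omega
    have hEb : ¬(D.isEmpty = true) := by simpa [List.isEmpty_iff] using hE
    rw [if_neg hEb, if_neg hlen, List.take_left, List.drop_left]
    by_cases hTnil : T = []
    · subst hTnil
      simp only [List.length_nil, if_true, List.foldl_nil, List.nil_append]
      exact Prod.ext rfl (trim_foldl sep hsep D)
    · have hTlen : T.length ≠ 0 := by simpa [List.length_eq_zero_iff] using hTnil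
      rw [if_neg hTlen]
      exact Prod.ext (foldl_eq_join_append sep T hTnil) (trim_foldl sep hsep D)

-- ===== VERDICT (by name: the statement is the Claim_ definition above) =====
theorem split_comments_spec : Claim_equal_split_comments := by
  intro code linesep _ hpre
  unfold Spec_split_comments split_comments split_comments_alt
  exact core linesep hpre _
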